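-- pv_equiv track=rewrite | github.com/AgentToolkit/agent-mentor | src/analytics/plugins/semantic-feature-analysis/analysis_summary/prompt.py | _format_issue_artifacts
-- ===== SOURCE A (Python) =====
-- def _format_issue_artifacts(artifacts: list) -> str:
--     """Format issue artifacts for LLM."""
--     lines = ["### Issue Artifacts (Detected Problems)"]
--     lines.append("")
--
--     # Group by severity
--     by_severity = {}
--     for artifact in artifacts:
--         severity = artifact.get('severity', 'unknown')
--         if severity not in by_severity:
--             by_severity[severity] = []
--         by_severity[severity].append(artifact)
--
--     for severity in ["critical", "high", "medium", "low"]: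
--         if severity not in by_severity:
--             continue
--
--         issues = by_severity[severity]
--         lines.append(f"**{severity.upper()} ({len(issues)} issues)**")
--
--         for issue in issues[:5]:  # Limit to 5 per severity
--             lines.append(f"- {issue.get('name', 'Unknown')}")
--             lines.append(f"  - Category: {issue.get('category', 'unknown')}")
--             if issue.get('description'):
--                 desc = issue['description'][:100] + "..." if len(issue['description']) > 100 else issue['description']
--                 lines.append(f"  - Description: {desc}")
--
--         if len(issues) > 5:
--             lines.append(f"  _(and {len(issues) - 5} more)_")
--         lines.append("")
--
--     return "\n".join(lines)
-- ===== SOURCE B (Python) =====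
-- def _issue_lines(issue):
--     out = [f"- {issue.get('name', 'Unknown')}",
--            f"  - Category: {issue.get('category', 'unknown')}"]
--     desc = issue.get('description', '')
--     if desc:
--         out.append("  - Description: " + (desc[:100] + "..." if len(desc) > 100 else desc))
--     return out
--
--
-- def _severity_block(severity, issues):
--     block = [f"**{severity.upper()} ({len(issues)} issues)**"]
--     for issue in issues[:5]:  # limit to 5 per severity
--         block.extend(_issue_lines(issue))
--     if len(issues) > 5:
--         block.append(f"  _(and {len(issues) - 5} more)_")
--     block.append("")
--     return block
--
--
-- def _format_issue_artifacts(artifacts: list) -> str: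
--     """Format issue artifacts for LLM."""
--     lines = ["### Issue Artifacts (Detected Problems)", ""]
--     for severity in ["critical", "high", "medium", "low"]:
--         issues = [a for a in artifacts if a.get('severity', 'unknown') == severity]
--         if issues:
--             lines.extend(_severity_block(severity, issues))
--     return "\n".join(lines)
-- ===== Notes on version B (the rewrite author's own statement) =====
-- stated objective: simpler
-- what changed: Dropped the by_severity grouping dict entirely: B scans the artifact list once per severity level with a filter and emits each block via small helper functions, instead of building a dict index first and then walking it.
import Mathlib
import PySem

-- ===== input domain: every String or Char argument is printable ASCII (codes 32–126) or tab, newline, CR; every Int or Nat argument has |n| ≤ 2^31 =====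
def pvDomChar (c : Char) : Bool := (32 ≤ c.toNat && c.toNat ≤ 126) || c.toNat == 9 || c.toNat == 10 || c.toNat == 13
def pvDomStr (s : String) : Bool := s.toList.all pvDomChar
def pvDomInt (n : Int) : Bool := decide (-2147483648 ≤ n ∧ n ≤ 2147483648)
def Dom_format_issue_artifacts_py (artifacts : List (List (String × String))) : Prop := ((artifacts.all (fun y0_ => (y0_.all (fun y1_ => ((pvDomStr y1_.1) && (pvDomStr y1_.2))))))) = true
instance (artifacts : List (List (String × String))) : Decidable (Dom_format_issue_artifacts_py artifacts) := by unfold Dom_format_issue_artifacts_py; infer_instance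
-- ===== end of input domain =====

-- B drops A's by_severity grouping dict: it filters the artifact list per severity level and
-- emits each block via helper functions (objective: simpler).

-- shared primitive: Python dict .get(k, dflt) on an artifact given as an association list
def pvGet (a : List (String × String)) (k dflt : String) : String :=
  (PySem.Dict.mk a).getD k dflt

-- ===== PORT A =====
-- the body of A's grouping loop (Python: `if severity not in by_severity: by_severity[severity] = []`
-- then `by_severity[severity].append(artifact)`)
def pvGroupStep (d : PySem.Dict String (List (List (String × String))))
    (a : List (String × String)) : PySem.Dict String (List (List (String × String))) :=
  let sev := pvGet a "severity" "unknown"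
  let d := if d.contains sev then d else d.insert sev []
  d.modify sev [] (fun l => l ++ [a])

def format_issue_artifacts_py (artifacts : List (List (String × String))) : String :=
  let lines : List String := ["### Issue Artifacts (Detected Problems)"] ++ [""]
  -- group by severity  (Python: `if severity not in by_severity: by_severity[severity] = []` then append)
  let by_severity : PySem.Dict String (List (List (String × String))) :=
    artifacts.foldl pvGroupStep PySem.Dict.empty
  let lines := ["critical", "high", "medium", "low"].foldl (fun lines sev =>
    if !(by_severity.contains sev) then lines
    else
      let issues := by_severity.getD sev []   -- key is present: getD = by_severity[sev]
      let lines := lines ++ ["**" ++ PySem.Str.upper sev ++ " (" ++ PySem.Int.toStr (issues.length : Int) ++ " issues)**"]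
      let lines := (PySem.List.slice issues none (some 5)).foldl (fun lines issue =>
        let lines := lines ++ ["- " ++ pvGet issue "name" "Unknown"]
        let lines := lines ++ ["  - Category: " ++ pvGet issue "category" "unknown"]
        -- Python: `if issue.get('description'):` — absent key and '' are both falsy
        let dsc := pvGet issue "description" ""
        if dsc ≠ "" then
          let d2 := if PySem.Str.len dsc > 100 then PySem.Str.slice dsc none (some 100) ++ "..." else dsc
          lines ++ ["  - Description: " ++ d2]
        else lines) lines
      let lines := if issues.length > 5 then
          lines ++ ["  _(and " ++ PySem.Int.toStr ((issues.length : Int) - 5) ++ " more)_"]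
        else lines
      lines ++ [""]) lines
  PySem.Str.join "\n" lines

-- ===== PORT B =====
def pvIssueLines (issue : List (String × String)) : List String :=
  let out := ["- " ++ pvGet issue "name" "Unknown",
              "  - Category: " ++ pvGet issue "category" "unknown"]
  let dsc := pvGet issue "description" ""
  if dsc ≠ "" then
    out ++ ["  - Description: " ++
            (if PySem.Str.len dsc > 100 then PySem.Str.slice dsc none (some 100) ++ "..." else dsc)]
  else out

def pvSeverityBlock (severity : String) (issues : List (List (String × String))) : List String :=
  let block := ["**" ++ PySem.Str.upper severity ++ " (" ++ PySem.Int.toStr (issues.length : Int) ++ " issues)**"]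
  let block := (PySem.List.slice issues none (some 5)).foldl (fun b i => b ++ pvIssueLines i) block
  let block := if issues.length > 5 then
      block ++ ["  _(and " ++ PySem.Int.toStr ((issues.length : Int) - 5) ++ " more)_"]
    else block
  block ++ [""]

def format_issue_artifacts_py_alt (artifacts : List (List (String × String))) : String :=
  let lines : List String := ["### Issue Artifacts (Detected Problems)", ""]
  let lines := ["critical", "high", "medium", "low"].foldl (fun lines severity =>
    let issues := artifacts.filter (fun a => pvGet a "severity" "unknown" == severity)
    if issues.isEmpty then lines else lines ++ pvSeverityBlock severity issues) lines
  PySem.Str.join "\n" lines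

-- ===== PRECONDITION & SPEC =====
def Spec_format_issue_artifacts_py (artifacts : List (List (String × String))) (out : String) : Prop := out = format_issue_artifacts_py_alt artifacts
instance (artifacts : List (List (String × String))) (out : String) : Decidable (Spec_format_issue_artifacts_py artifacts out) := by unfold Spec_format_issue_artifacts_py; infer_instance

-- ===== CLAIM (what is proved, stated in full; the proofs are below) =====
def Claim_equal_format_issue_artifacts_py : Prop := ∀ (artifacts : List (List (String × String))), Dom_format_issue_artifacts_py artifacts → Spec_format_issue_artifacts_py artifacts (format_issue_artifacts_py artifacts)

-- ===== LEMMAS AND PROOFS =====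

theorem pvGroup_getD (l : List (List (String × String)))
    (d : PySem.Dict String (List (List (String × String)))) (s : String) :
    (l.foldl pvGroupStep d).getD s [] =
      d.getD s [] ++ l.filter (fun a => pvGet a "severity" "unknown" == s) := by
  induction l generalizing d with
  | nil => simp
  | cons a t ih =>
    simp only [List.foldl_cons, List.filter_cons, ih]
    by_cases hs : pvGet a "severity" "unknown" = s
    · subst hs
      by_cases hc : d.contains (pvGet a "severity" "unknown")
      · simp [pvGroupStep, hc]
      · simp [pvGroupStep, hc,
          PySem.Dict.getD_of_not_contains d _ (by simpa using hc)]
    · have hb : (pvGet a "severity" "unknown" == s) = false := by simpa using hs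
      by_cases hc : d.contains (pvGet a "severity" "unknown") <;>
        simp [pvGroupStep, hc, hb, PySem.Dict.getD_modify, PySem.Dict.getD_insert, Ne.symm hs]

theorem pvGroup_contains (l : List (List (String × String)))
    (d : PySem.Dict String (List (List (String × String)))) (s : String) :
    (l.foldl pvGroupStep d).contains s =
      (d.contains s || l.any (fun a => pvGet a "severity" "unknown" == s)) := by
  induction l generalizing d with
  | nil => simp
  | cons a t ih =>
    simp only [List.foldl_cons, List.any_cons, ih]
    by_cases hs : pvGet a "severity" "unknown" = s
    · subst hs
      by_cases hc : d.contains (pvGet a "severity" "unknown") <;>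
        simp [pvGroupStep, hc, PySem.Dict.contains_modify]
    · have hb : (pvGet a "severity" "unknown" == s) = false := by simpa using hs
      have hb' : (s == pvGet a "severity" "unknown") = false := by
        simpa using Ne.symm hs
      by_cases hc : d.contains (pvGet a "severity" "unknown") <;>
        simp [pvGroupStep, hc, hb, hb', PySem.Dict.contains_modify, PySem.Dict.contains_insert]

-- A's inner per-issue loop body is exactly pvIssueLines appended
theorem pvInnerStep_eq (lines : List String) (issue : List (String × String)) :
    (let lines := lines ++ ["- " ++ pvGet issue "name" "Unknown"]
     let lines := lines ++ ["  - Category: " ++ pvGet issue "category" "unknown"]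
     let dsc := pvGet issue "description" ""
     if dsc ≠ "" then
       let d2 := if PySem.Str.len dsc > 100 then PySem.Str.slice dsc none (some 100) ++ "..." else dsc
       lines ++ ["  - Description: " ++ d2]
     else lines) = lines ++ pvIssueLines issue := by
  simp only [pvIssueLines]
  split <;> simp

-- A's per-severity else-branch equals lines ++ pvSeverityBlock
theorem pvBlock_eq (lines : List String) (sev : String)
    (issues : List (List (String × String))) :
    (let lines := lines ++ ["**" ++ PySem.Str.upper sev ++ " (" ++ PySem.Int.toStr (issues.length : Int) ++ " issues)**"]
     let lines := (PySem.List.slice issues none (some 5)).foldl (fun lines issue =>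
        let lines := lines ++ ["- " ++ pvGet issue "name" "Unknown"]
        let lines := lines ++ ["  - Category: " ++ pvGet issue "category" "unknown"]
        let dsc := pvGet issue "description" ""
        if dsc ≠ "" then
          let d2 := if PySem.Str.len dsc > 100 then PySem.Str.slice dsc none (some 100) ++ "..." else dsc
          lines ++ ["  - Description: " ++ d2]
        else lines) lines
     let lines := if issues.length > 5 then
          lines ++ ["  _(and " ++ PySem.Int.toStr ((issues.length : Int) - 5) ++ " more)_"]
        else lines
     lines ++ [""]) = lines ++ pvSeverityBlock sev issues := by
  simp only [pvSeverityBlock]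
  have h1 : ∀ acc : List String,
      (PySem.List.slice issues none (some 5)).foldl (fun lines issue =>
        let lines := lines ++ ["- " ++ pvGet issue "name" "Unknown"]
        let lines := lines ++ ["  - Category: " ++ pvGet issue "category" "unknown"]
        let dsc := pvGet issue "description" ""
        if dsc ≠ "" then
          let d2 := if PySem.Str.len dsc > 100 then PySem.Str.slice dsc none (some 100) ++ "..." else dsc
          lines ++ ["  - Description: " ++ d2]
        else lines) acc
      = acc ++ (PySem.List.slice issues none (some 5)).flatMap pvIssueLines := by
    intro acc
    rw [← PySem.List.foldl_append_eq_flatMap]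
    apply PySem.List.foldl_congr_mem
    intro acc' x _
    exact pvInnerStep_eq acc' x
  have h2 : ∀ acc : List String,
      (PySem.List.slice issues none (some 5)).foldl (fun b i => b ++ pvIssueLines i) acc
      = acc ++ (PySem.List.slice issues none (some 5)).flatMap pvIssueLines :=
    fun acc => PySem.List.foldl_append_eq_flatMap _ _ _
  simp only [h1, h2]
  split <;> simp

theorem format_issue_artifacts_py_spec : Claim_equal_format_issue_artifacts_py := by
  intro artifacts _
  unfold Spec_format_issue_artifacts_py
  unfold format_issue_artifacts_py format_issue_artifacts_py_alt
  dsimp only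
  apply congrArg
  apply PySem.List.foldl_congr_mem
  intro lines sev _
  have hg : (artifacts.foldl pvGroupStep PySem.Dict.empty).getD sev [] =
      artifacts.filter (fun a => pvGet a "severity" "unknown" == sev) := by
    simpa using pvGroup_getD artifacts PySem.Dict.empty sev
  have hc : (artifacts.foldl pvGroupStep PySem.Dict.empty).contains sev =
      artifacts.any (fun a => pvGet a "severity" "unknown" == sev) := by
    simpa using pvGroup_contains artifacts PySem.Dict.empty sev
  rw [hc]
  by_cases he : artifacts.filter (fun a => pvGet a "severity" "unknown" == sev) = []
  · have hany : artifacts.any (fun a => pvGet a "severity" "unknown" == sev) = false := by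
      simp only [List.any_eq_false]
      intro x hx
      simpa using List.filter_eq_nil_iff.mp he x hx
    rw [hany]
    simp [he]
  · have hany : artifacts.any (fun a => pvGet a "severity" "unknown" == sev) = true := by
      rcases List.exists_mem_of_ne_nil _ he with ⟨x, hx⟩
      exact List.any_eq_true.mpr ⟨x, List.mem_of_mem_filter hx, (List.mem_filter.mp hx).2⟩
    have hie : (artifacts.filter (fun a => pvGet a "severity" "unknown" == sev)).isEmpty = false := by
      simp [he]
    rw [hany, hie]
    simp only [Bool.not_true, Bool.false_eq_true, if_false]
    rw [hg]
    exact pvBlock_eq lines sev _
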